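-- pv_equiv track=rewrite | github.com/JohnatanQuinteroV/4DSequenceTimeAlignment | paso5.py | alignment3
-- ===== SOURCE A (Python) =====
-- def alignment3(huecos):
--     cnt1, cnt2= 0, 0
--     d1, d2= 0, 0
--     arr= []
--     for i in huecos:
--         if i != 'X':        # X define un nuevo frame
--             if i == '-':    #si hay un espacio suma 1 a cnt1
--                 cnt1+=1
--             if cnt1 == 80:  #75 espacios que representan 1 hueco, 1 frame vacio
--                 d1+=1
--                 cnt1=0
--         elif i == 'X':      # hay un nuevo frame
--             cnt2+=1
--             if d1 == 0:  #si no hay espacios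
--                 arr.insert(d2,cnt2)  #inserta un numero que dice el frame respectivo
--                 d2+=1
--             elif d1 != 0:#si hay espacios
--                 for i in range(d1):
--                     arr.insert(d2, 0)#inserta un cero si hay minimo 75 espacios en blanco
--                     d2+=1
--                 arr.insert(d2, cnt2) #inserta el frame que sigue, luego de poner los ceros
--                 d2+=1
--             cnt1, d1 = 0, 0
--     return arr      #devuelve arreglo con numeros para frames y ceros para huecos
-- ===== SOURCE B (Python) =====
-- def alignment3(huecos):
--     # Phase 1: dash count of each segment terminated by an 'X' (tail after last 'X' is dropped).
--     counts = []
--     c = 0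
--     for t in huecos:
--         if t == 'X':
--             counts.append(c)
--             c = 0
--         elif t == '-':
--             c += 1
--     # Phase 2: for the i-th segment emit count//80 zeros then the frame number i+1.
--     out = []
--     for i, c in enumerate(counts):
--         out += [0] * (c // 80) + [i + 1]
--     return out
-- ===== Notes on version B (the rewrite author's own statement) =====
-- stated objective: simpler
-- what changed: Replaces A's single stateful loop (running 80-reset counter, frame counter, and positional arr.insert bookkeeping with d2) by two plain phases: collect the dash count of each X-terminated segment, then emit count//80 zeros and the frame index per segment.
import Mathlib
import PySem

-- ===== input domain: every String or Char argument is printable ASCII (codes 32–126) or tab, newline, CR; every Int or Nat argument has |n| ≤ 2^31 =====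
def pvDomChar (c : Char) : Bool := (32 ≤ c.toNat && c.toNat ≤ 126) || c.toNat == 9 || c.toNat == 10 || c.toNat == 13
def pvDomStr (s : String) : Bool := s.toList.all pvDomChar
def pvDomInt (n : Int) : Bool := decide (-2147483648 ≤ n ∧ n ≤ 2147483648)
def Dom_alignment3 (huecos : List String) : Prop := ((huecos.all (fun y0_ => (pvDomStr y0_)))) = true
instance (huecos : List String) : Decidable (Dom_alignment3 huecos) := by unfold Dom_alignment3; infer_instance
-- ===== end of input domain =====

-- B replaces A's stateful 80-reset counting loop with positional inserts by two plain phases: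
-- per-segment dash counts, then count//80 zeros plus the frame index per segment (objective: simpler).


-- ===== PORT A =====
def alignment3 (huecos : List String) : List Int :=
  (huecos.foldl (fun (st : Int × Int × Int × Int × List Int) (i : String) =>
    let cnt1 := st.1; let cnt2 := st.2.1; let d1 := st.2.2.1
    let d2 := st.2.2.2.1; let arr := st.2.2.2.2
    if i ≠ "X" then
      let cnt1 := if i = "-" then cnt1 + 1 else cnt1
      if cnt1 = 80 then (0, cnt2, d1 + 1, d2, arr) else (cnt1, cnt2, d1, d2, arr)
    else
      let cnt2 := cnt2 + 1
      if d1 = 0 then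
        (0, cnt2, 0, d2 + 1, PySem.List.insert arr d2 cnt2)
      else
        let p := (PySem.List.pyRange 0 d1 1).foldl
          (fun (p : Int × List Int) _ => (p.1 + 1, PySem.List.insert p.2 p.1 0)) (d2, arr)
        (0, cnt2, 0, p.1 + 1, PySem.List.insert p.2 p.1 cnt2))
    ((0 : Int), (0 : Int), (0 : Int), (0 : Int), ([] : List Int))).2.2.2.2

-- ===== PORT B =====
-- phase 1 of Source B: dash count of each X-terminated segment
def pvGo (c : Nat) : List String → List Nat
  | [] => []
  | t :: ts => if t = "X" then c :: pvGo 0 ts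
               else if t = "-" then pvGo (c + 1) ts else pvGo c ts

-- phase 2 of Source B: per segment i emit count//80 zeros then i+1
def pvRender (k : Nat) : List Nat → List Int
  | [] => []
  | c :: cs => List.replicate (c / 80) 0 ++ ((k : Int) + 1) :: pvRender (k + 1) cs

def alignment3_alt (huecos : List String) : List Int := pvRender 0 (pvGo 0 huecos)

-- ===== PRECONDITION & SPEC =====
def Spec_alignment3 (huecos : List String) (out : List Int) : Prop := out = alignment3_alt huecos
instance (huecos : List String) (out : List Int) : Decidable (Spec_alignment3 huecos out) := by unfold Spec_alignment3; infer_instance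

-- ===== CLAIM (what is proved, stated in full; the proofs are below) =====
def Claim_equal_alignment3 : Prop := ∀ (huecos : List String), Dom_alignment3 huecos → Spec_alignment3 huecos (alignment3 huecos)

-- ===== LEMMAS AND PROOFS =====

-- the step function of A's fold, named for the proofs
def pvStepA (st : Int × Int × Int × Int × List Int) (i : String) : Int × Int × Int × Int × List Int :=
    let cnt1 := st.1; let cnt2 := st.2.1; let d1 := st.2.2.1
    let d2 := st.2.2.2.1; let arr := st.2.2.2.2
    if i ≠ "X" then
      let cnt1 := if i = "-" then cnt1 + 1 else cnt1
      if cnt1 = 80 then (0, cnt2, d1 + 1, d2, arr) else (cnt1, cnt2, d1, d2, arr)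
    else
      let cnt2 := cnt2 + 1
      if d1 = 0 then
        (0, cnt2, 0, d2 + 1, PySem.List.insert arr d2 cnt2)
      else
        let p := (PySem.List.pyRange 0 d1 1).foldl
          (fun (p : Int × List Int) _ => (p.1 + 1, PySem.List.insert p.2 p.1 0)) (d2, arr)
        (0, cnt2, 0, p.1 + 1, PySem.List.insert p.2 p.1 cnt2)

theorem alignment3_eq_fold (huecos : List String) :
    alignment3 huecos = (huecos.foldl pvStepA (0, 0, 0, 0, [])).2.2.2.2 := rfl

-- the element-ignoring inner zero-insert loop appends that many zeros
theorem pvZeroFold (l : List Int) (acc : List Int) :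
    l.foldl (fun (p : Int × List Int) _ => (p.1 + 1, PySem.List.insert p.2 p.1 0))
      ((acc.length : Int), acc)
    = (((acc.length + l.length : Nat) : Int), acc ++ List.replicate l.length 0) := by
  induction l generalizing acc with
  | nil => simp
  | cons x xs ih =>
    simp only [List.foldl_cons]
    have h1 : PySem.List.insert acc ((acc.length : Nat) : Int) 0 = acc ++ [0] :=
      PySem.List.insert_length acc 0
    rw [h1]
    have h2 : ((acc.length : Int) + 1) = (((acc ++ [0]).length : Nat) : Int) := by
      simp
    rw [h2, ih (acc ++ [0])]
    simp only [Prod.mk.injEq]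
    refine ⟨by simp only [List.length_append, List.length_cons, List.length_nil]; push_cast; ring, by simp [List.replicate_succ]⟩

theorem pvMain (xs : List String) : ∀ (c k : Nat) (acc : List Int),
    (xs.foldl pvStepA (((c % 80 : Nat) : Int), ((k : Nat) : Int), ((c / 80 : Nat) : Int),
        ((acc.length : Nat) : Int), acc)).2.2.2.2
    = acc ++ pvRender k (pvGo c xs) := by
  induction xs with
  | nil => intro c k acc; simp [pvGo, pvRender]
  | cons t ts ih =>
    intro c k acc
    by_cases ht : t = "X"
    · subst ht
      by_cases h0 : c / 80 = 0
      · have hstep : pvStepA (((c % 80 : Nat) : Int), ((k : Nat) : Int), ((c / 80 : Nat) : Int),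
            ((acc.length : Nat) : Int), acc) "X"
            = (((0 % 80 : Nat) : Int), (((k + 1 : Nat)) : Int), ((0 / 80 : Nat) : Int),
               (((acc ++ [((k : Int) + 1)]).length : Nat) : Int), acc ++ [((k : Int) + 1)]) := by
          simp [pvStepA, h0, PySem.List.insert_length]
        simp only [List.foldl_cons, hstep, ih]
        simp [pvGo, pvRender, h0]
      · -- d1 ≠ 0: the range loop appends c/80 zeros, then the frame number
        have hlen : (PySem.List.pyRange 0 ((c / 80 : Nat) : Int) 1).length = c / 80 := by
          rw [PySem.List.length_pyRange_one]; omega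
        have hz := pvZeroFold (PySem.List.pyRange 0 ((c / 80 : Nat) : Int) 1) acc
        rw [hlen] at hz
        have hstep : pvStepA (((c % 80 : Nat) : Int), ((k : Nat) : Int), ((c / 80 : Nat) : Int),
            ((acc.length : Nat) : Int), acc) "X"
            = (((0 % 80 : Nat) : Int), (((k + 1 : Nat)) : Int), ((0 / 80 : Nat) : Int),
               (((acc ++ List.replicate (c / 80) 0 ++ [((k : Int) + 1)]).length : Nat) : Int),
               acc ++ List.replicate (c / 80) 0 ++ [((k : Int) + 1)]) := by
          simp only [pvStepA]
          have hne : ((c / 80 : Nat) : Int) ≠ 0 := by exact_mod_cast h0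
          simp only [if_neg (by simp : ¬ ("X" ≠ "X")), if_neg hne, hz]
          have h3 : ((acc.length + c / 80 : Nat) : Int)
              = (((acc ++ List.replicate (c / 80) 0).length : Nat) : Int) := by simp
          rw [h3, PySem.List.insert_length]
          simp
          ring
        simp only [List.foldl_cons, hstep, ih]
        simp [pvGo, pvRender, List.append_assoc]
    · -- a non-X element: only the dash counter may move
      by_cases hd : t = "-"
      · subst hd
        by_cases h80 : c % 80 + 1 = 80
        · have hstep : pvStepA (((c % 80 : Nat) : Int), ((k : Nat) : Int), ((c / 80 : Nat) : Int),
              ((acc.length : Nat) : Int), acc) "-"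
              = ((((c + 1) % 80 : Nat) : Int), ((k : Nat) : Int), (((c + 1) / 80 : Nat) : Int),
                 ((acc.length : Nat) : Int), acc) := by
            have e1 : (c + 1) % 80 = 0 := by omega
            have e2 : (c + 1) / 80 = c / 80 + 1 := by omega
            simp [pvStepA, e1, e2]
            all_goals omega
          simp only [List.foldl_cons, hstep, ih]
          simp [pvGo]
        · have hstep : pvStepA (((c % 80 : Nat) : Int), ((k : Nat) : Int), ((c / 80 : Nat) : Int),
              ((acc.length : Nat) : Int), acc) "-"
              = ((((c + 1) % 80 : Nat) : Int), ((k : Nat) : Int), (((c + 1) / 80 : Nat) : Int),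
                 ((acc.length : Nat) : Int), acc) := by
            have e1 : (c + 1) % 80 = c % 80 + 1 := by omega
            have e2 : (c + 1) / 80 = c / 80 := by omega
            have hne2 : ¬((c : Int) % 80 + 1 = 80) := by omega
            simp [pvStepA, hne2, e1, e2]
          simp only [List.foldl_cons, hstep, ih]
          simp [pvGo]
      · have hstep : pvStepA (((c % 80 : Nat) : Int), ((k : Nat) : Int), ((c / 80 : Nat) : Int),
            ((acc.length : Nat) : Int), acc) t
            = (((c % 80 : Nat) : Int), ((k : Nat) : Int), ((c / 80 : Nat) : Int),
               ((acc.length : Nat) : Int), acc) := by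
          have hne2 : ¬((c : Int) % 80 = 80) := by omega
          simp [pvStepA, ht, hd, hne2]
        simp only [List.foldl_cons, hstep, ih]
        simp [pvGo, ht, hd]

-- ===== VERDICT (by name: the statement is the Claim_ definition above) =====
theorem alignment3_spec : Claim_equal_alignment3 := by
  intro huecos _
  show alignment3 huecos = alignment3_alt huecos
  rw [alignment3_eq_fold]
  have h := pvMain huecos 0 0 []
  simpa [alignment3_alt] using h
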